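-- pv_equiv track=rewrite | github.com/rahul370139/marchpaws_rag | make_windows.py | expand_windows
-- ===== SOURCE A (Python) =====
-- def expand_windows(windows, para_map, max_paras=12):
--     """5. Expansion & de-dup - expand windows to individual paragraphs."""
--     seen, out = set(), []
--     for w in windows:
--         for pid in w["paragraph_ids"]:
--             if pid not in seen and pid in para_map:
--                 out.append(para_map[pid])
--                 seen.add(pid)
--                 if len(out) >= max_paras:
--                     return out
--     return out
-- ===== SOURCE B (Python) =====
-- def expand_windows(windows, para_map, max_paras=12):
--     """Two-phase: collect unique in-map paragraph ids first, then emit with cap."""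
--     ids = dict.fromkeys(pid for w in windows for pid in w["paragraph_ids"] if pid in para_map)
--     out = []
--     for pid in ids:
--         out.append(para_map[pid])
--         if len(out) >= max_paras:
--             break
--     return out
-- ===== Notes on version B (the rewrite author's own statement) =====
-- stated objective: alternative
-- what changed: A's single fused nested loop with a seen-set and an early return is replaced by a two-phase computation: first build the order-preserving list of unique in-map paragraph ids via dict.fromkeys over a flat generator, then a second flat loop emits para_map values with a post-append cap check.
import Mathlib
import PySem

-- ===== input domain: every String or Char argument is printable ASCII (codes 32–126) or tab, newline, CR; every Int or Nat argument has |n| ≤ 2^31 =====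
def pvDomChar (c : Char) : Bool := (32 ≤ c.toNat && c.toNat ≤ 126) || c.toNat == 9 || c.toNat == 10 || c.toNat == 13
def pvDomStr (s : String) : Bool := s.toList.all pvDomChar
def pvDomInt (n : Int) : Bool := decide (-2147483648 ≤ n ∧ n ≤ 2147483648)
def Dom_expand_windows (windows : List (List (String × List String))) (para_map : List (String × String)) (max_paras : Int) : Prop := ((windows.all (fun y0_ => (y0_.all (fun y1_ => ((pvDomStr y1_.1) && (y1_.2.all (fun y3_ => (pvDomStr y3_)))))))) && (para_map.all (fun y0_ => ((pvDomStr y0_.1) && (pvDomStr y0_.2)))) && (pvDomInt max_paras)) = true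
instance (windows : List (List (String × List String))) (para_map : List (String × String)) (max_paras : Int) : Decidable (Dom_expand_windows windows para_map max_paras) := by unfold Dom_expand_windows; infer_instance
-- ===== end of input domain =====

-- B replaces A's fused nested loop (seen-set + early return) by a two-phase shape:
-- collect the unique in-map paragraph ids first (dict.fromkeys), then one flat emission loop
-- with the cap checked after each append; same cost, different decomposition (objective: alternative).

-- ===== PORT A =====
-- inner 'for pid in w["paragraph_ids"]' loop; Sum.inr = early 'return out' from the function
def ewInner (pm : List (String × String)) (mp : Int) :
    List String → PySem.Set String → List String → (PySem.Set String × List String) ⊕ List String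
  | [], seen, out => Sum.inl (seen, out)
  | pid :: rest, seen, out =>
    if !(PySem.Set.contains seen pid) && (PySem.Dict.mk pm).contains pid then
      -- para_map[pid]; the getD "" guard is never hit (contains holds on this branch)
      let out' := out ++ [((PySem.Dict.mk pm).get? pid).getD ""]
      if mp ≤ (out'.length : Int) then Sum.inr out'
      else ewInner pm mp rest (PySem.Set.add seen pid) out'
    else ewInner pm mp rest seen out

-- outer 'for w in windows' loop
def ewOuter (pm : List (String × String)) (mp : Int) :
    List (List (String × List String)) → PySem.Set String → List String → List String
  | [], _, out => out
  | w :: ws, seen, out =>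
    -- w["paragraph_ids"]; KeyError (missing key) is excluded by Pre_, getD [] only totalizes
    match ewInner pm mp ((PySem.Dict.mk w).getD "paragraph_ids" []) seen out with
    | Sum.inr r => r
    | Sum.inl (seen', out') => ewOuter pm mp ws seen' out'

def expand_windows (windows : List (List (String × List String))) (para_map : List (String × String)) (max_paras : Int) : List String :=
  ewOuter para_map max_paras windows PySem.Set.empty []

-- ===== PORT B =====
-- second phase: 'for pid in ids: out.append(para_map[pid]); if len(out) >= max_paras: break'
def ewEmit (pm : List (String × String)) (mp : Int) : List String → List String → List String
  | [], out => out
  | pid :: rest, out =>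
    let out' := out ++ [((PySem.Dict.mk pm).get? pid).getD ""]
    if mp ≤ (out'.length : Int) then out' else ewEmit pm mp rest out'

def expand_windows_alt (windows : List (List (String × List String))) (para_map : List (String × String)) (max_paras : Int) : List String :=
  -- ids = dict.fromkeys(pid for w in windows for pid in w["paragraph_ids"] if pid in para_map)
  let ids := PySem.List.dedup
    ((windows.flatMap (fun w => (PySem.Dict.mk w).getD "paragraph_ids" [])).filter
      (fun pid => (PySem.Dict.mk para_map).contains pid))
  ewEmit para_map max_paras ids []

-- ===== PRECONDITION & SPEC =====
-- Pre_ excludes exactly the inputs where the Python raises KeyError: a window without the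
-- "paragraph_ids" key (both A and B raise there).
def Pre_expand_windows (windows : List (List (String × List String))) (para_map : List (String × String)) (max_paras : Int) : Prop :=
  ∀ w ∈ windows, (PySem.Dict.mk w).contains "paragraph_ids" = true
instance (windows : List (List (String × List String))) (para_map : List (String × String)) (max_paras : Int) : Decidable (Pre_expand_windows windows para_map max_paras) := by unfold Pre_expand_windows; infer_instance

def pvWitness_expand_windows : (List (List (String × List String))) × (List (String × String)) × Int :=
  ([[("paragraph_ids", ["a", "b"])]], [("a", "Pa")], 2)

def Spec_expand_windows (windows : List (List (String × List String))) (para_map : List (String × String)) (max_paras : Int) (out : List String) : Prop := out = expand_windows_alt windows para_map max_paras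
instance (windows : List (List (String × List String))) (para_map : List (String × String)) (max_paras : Int) (out : List String) : Decidable (Spec_expand_windows windows para_map max_paras out) := by unfold Spec_expand_windows; infer_instance

-- ===== CLAIM (what is proved, stated in full; the proofs are below) =====
def Claim_equal_expand_windows : Prop := ∀ (windows : List (List (String × List String))) (para_map : List (String × String)) (max_paras : Int), Dom_expand_windows windows para_map max_paras → Pre_expand_windows windows para_map max_paras → Spec_expand_windows windows para_map max_paras (expand_windows windows para_map max_paras)

-- ===== LEMMAS AND PROOFS =====

-- first-occurrence dedup of the in-map pids, relative to a seen-set (characterises A's selection)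
def dds (pm : List (String × String)) : List String → PySem.Set String → List String
  | [], _ => []
  | pid :: rest, seen =>
    if !(PySem.Set.contains seen pid) && (PySem.Dict.mk pm).contains pid then
      pid :: dds pm rest (PySem.Set.add seen pid)
    else dds pm rest seen

-- A's inner loop, continued by an emission of 'dds tail', equals the emission of 'dds (ps ++ tail)'
theorem ewInner_emit (pm : List (String × String)) (mp : Int) :
    ∀ (ps tail : List String) (seen : PySem.Set String) (out : List String),
    (match ewInner pm mp ps seen out with
     | Sum.inr r => r
     | Sum.inl (seen', out') => ewEmit pm mp (dds pm tail seen') out')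
    = ewEmit pm mp (dds pm (ps ++ tail) seen) out := by
  intro ps tail
  induction ps with
  | nil => intro seen out; simp [ewInner]
  | cons pid rest ih =>
    intro seen out
    by_cases h : (!(PySem.Set.contains seen pid) && (PySem.Dict.mk pm).contains pid) = true
    · simp only [ewInner, dds, List.cons_append, h, if_true, ewEmit]
      by_cases hc : mp ≤ ((out ++ [((PySem.Dict.mk pm).get? pid).getD ""]).length : Int)
      · rw [if_pos hc, if_pos hc]
      · rw [if_neg hc, if_neg hc]
        exact ih _ _
    · simp only [ewInner, dds, h, if_false, Bool.false_eq_true, List.cons_append]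
      exact ih _ _

-- A's outer loop equals the emission of the dedup of the flattened id stream
theorem ewOuter_emit (pm : List (String × String)) (mp : Int) :
    ∀ (ws : List (List (String × List String))) (seen : PySem.Set String) (out : List String),
    ewOuter pm mp ws seen out
      = ewEmit pm mp (dds pm (ws.flatMap (fun w => (PySem.Dict.mk w).getD "paragraph_ids" [])) seen) out := by
  intro ws
  induction ws with
  | nil => intro seen out; simp [ewOuter, dds, ewEmit]
  | cons w ws ih =>
    intro seen out
    rw [List.flatMap_cons, ← ewInner_emit pm mp]
    simp only [ewOuter]
    cases hres : ewInner pm mp ((PySem.Dict.mk w).getD "paragraph_ids" []) seen out with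
    | inr r => rfl
    | inl p => cases p with | mk s o => simp [ih s o]

-- dds accumulates exactly the Set.add-fold of the filtered stream
theorem dds_seen (pm : List (String × String)) :
    ∀ (ps : List String) (seen : PySem.Set String),
    seen ++ dds pm ps seen
      = (ps.filter (fun pid => (PySem.Dict.mk pm).contains pid)).foldl PySem.Set.add seen := by
  intro ps
  induction ps with
  | nil => intro seen; simp [dds]
  | cons pid rest ih =>
    intro seen
    by_cases hf : (PySem.Dict.mk pm).contains pid = true
    · rw [List.filter_cons_of_pos hf, List.foldl_cons]
      by_cases hs : PySem.Set.contains seen pid = true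
      · have hm : pid ∈ seen := (PySem.Set.contains_iff seen pid).mp hs
        have hadd : PySem.Set.add seen pid = seen := by
          simp [PySem.Set.add, hm]
        simp only [dds, hs, hf, Bool.not_true, Bool.false_and, Bool.false_eq_true, if_false, hadd]
        exact ih seen
      · have hm : pid ∉ seen := fun m => hs ((PySem.Set.contains_iff seen pid).mpr m)
        have hadd : PySem.Set.add seen pid = seen ++ [pid] := by
          simp [PySem.Set.add, hm]
        simp only [dds, hs, hf, Bool.not_false, Bool.true_and, if_true]
        rw [← ih (PySem.Set.add seen pid), hadd]
        simp
    · rw [List.filter_cons_of_neg hf]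
      simp only [dds, hf, Bool.and_false, Bool.false_eq_true, if_false]
      exact ih seen

theorem dds_empty (pm : List (String × String)) (ps : List String) :
    dds pm ps (PySem.Set.empty : PySem.Set String)
      = PySem.List.dedup (ps.filter (fun pid => (PySem.Dict.mk pm).contains pid)) := by
  have h := dds_seen pm ps []
  simpa [PySem.List.dedup_eq_ofList, PySem.Set.ofList_eq_foldl, PySem.Set.empty] using h

-- ===== VERDICT (by name: the statement is the Claim_ definition above) =====
theorem expand_windows_spec : Claim_equal_expand_windows := by
  intro windows para_map max_paras _ _
  unfold Spec_expand_windows expand_windows expand_windows_alt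
  rw [ewOuter_emit, dds_empty]
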